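-- pv_equiv track=rewrite | github.com/AjaniStewart/machine_learning | assignment2/assignment2.py | getFeatureSplit
-- ===== SOURCE A (Python) =====
-- from collections import defaultdict
--
-- def getLabelCounts(data):
--   counts = defaultdict(int)
--   for i in data:
--     counts[i[-1]] += 1
--   return counts
--
-- def getFeatureSplit(data,featureIndex):
--   c = getLabelCounts(data)
--   res = {}
--   d = {}
--   for i,k in enumerate(list(c)):
--     d[k] = i
--   for instance in data:
--     if instance[featureIndex] in res:
--       res[instance[featureIndex]][d[instance[-1]]] += 1
--     else:
--       l = [0 for _ in c.keys()]
--       l[d[instance[-1]]] = 1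
--       res[instance[featureIndex]] = l
--   return res,d
-- ===== SOURCE B (Python) =====
-- def getFeatureSplit(data, featureIndex):
--     # first pass: label order by first appearance
--     labels = []
--     for row in data:
--         lab = row[-1]
--         if lab not in labels:
--             labels.append(lab)
--     d = {lab: i for i, lab in enumerate(labels)}
--     # second pass: nested counts keyed by feature value then label
--     nested = {}
--     for row in data:
--         fv = row[featureIndex]
--         lab = row[-1]
--         inner = nested.get(fv, {})
--         inner[lab] = inner.get(lab, 0) + 1
--         nested[fv] = inner
--     # materialize each feature value into a count vector over labels
--     res = {fv: [inner.get(lab, 0) for lab in labels] for fv, inner in nested.items()}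
--     return res, d
-- ===== Notes on version B (the rewrite author's own statement) =====
-- stated objective: alternative
-- what changed: Instead of A's single pass that keeps per-feature-value count vectors and bumps them in place at the counter-derived label index, B collects label order by first appearance, accumulates a nested feature-value->label->count dict, and materializes the count vectors in a final pass.
import Mathlib
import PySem

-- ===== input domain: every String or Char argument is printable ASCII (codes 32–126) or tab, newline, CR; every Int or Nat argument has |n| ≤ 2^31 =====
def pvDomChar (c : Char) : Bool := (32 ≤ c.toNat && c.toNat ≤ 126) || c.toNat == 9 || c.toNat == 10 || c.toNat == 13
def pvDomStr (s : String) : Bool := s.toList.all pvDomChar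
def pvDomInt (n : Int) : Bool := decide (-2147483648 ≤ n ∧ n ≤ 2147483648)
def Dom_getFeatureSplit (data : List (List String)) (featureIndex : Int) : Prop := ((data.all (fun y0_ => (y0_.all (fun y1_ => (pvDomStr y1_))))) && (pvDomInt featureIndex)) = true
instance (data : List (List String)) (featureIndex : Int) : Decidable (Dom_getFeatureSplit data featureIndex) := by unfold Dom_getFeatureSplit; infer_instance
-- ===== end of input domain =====

-- B replaces A's single-pass in-place count-vector updates by a label-order pass plus a nested
-- (feature value → label → count) accumulation that is materialized into vectors at the end;
-- same cost, different decomposition (objective: alternative). No argument is mutated.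

-- ===== PORT A =====
-- row[-1] / row[featureIndex] are ported with pyGet?; the `.getD ""` total form is only
-- reached where Python raises IndexError, and those inputs are excluded by Pre_ below.
-- defaultdict(int)'s `counts[k] += 1` is Dict.modify k 0 (·+1), exact.
def getLabelCounts (data : List (List String)) : PySem.Dict String Int :=
  data.foldl (fun counts i =>
    counts.modify ((PySem.List.pyGet? i (-1)).getD "") 0 (· + 1)) PySem.Dict.empty

def getFeatureSplit (data : List (List String)) (featureIndex : Int) :
    (List (String × List Int)) × (List (String × Int)) :=
  let c := getLabelCounts data
  let d := (PySem.List.enumerate c.keys 0).foldl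
      (fun d p => d.insert p.2 p.1) (PySem.Dict.empty : PySem.Dict String Int)
  let res := data.foldl (fun (res : PySem.Dict String (List Int)) inst =>
      let fv := (PySem.List.pyGet? inst featureIndex).getD ""
      let lab := (PySem.List.pyGet? inst (-1)).getD ""
      if res.contains fv then
        -- res[fv][d[lab]] += 1  (in-place list update = insert of the updated list)
        res.insert fv (PySem.List.pySetD (res.getD fv []) (d.getD lab 0)
          (PySem.List.pyGetD (res.getD fv []) (d.getD lab 0) 0 + 1))
      else
        -- l = [0 for _ in c.keys()]; l[d[lab]] = 1; res[fv] = l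
        res.insert fv (PySem.List.pySetD (c.keys.map (fun _ => (0 : Int))) (d.getD lab 0) 1))
    PySem.Dict.empty
  (res.items, d.items)

-- ===== PORT B =====
-- dict comprehensions over keys that are distinct by construction are ported as the pair lists.
def getFeatureSplit_alt (data : List (List String)) (featureIndex : Int) :
    (List (String × List Int)) × (List (String × Int)) :=
  let labels := data.foldl (fun ls row =>
      let lab := (PySem.List.pyGet? row (-1)).getD ""
      if ls.contains lab then ls else ls ++ [lab]) ([] : List String)
  let d := (PySem.List.enumerate labels 0).map (fun p => (p.2, p.1))
  let nested := data.foldl (fun (n : PySem.Dict String (PySem.Dict String Int)) row =>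
      let fv := (PySem.List.pyGet? row featureIndex).getD ""
      let lab := (PySem.List.pyGet? row (-1)).getD ""
      let inner := n.getD fv PySem.Dict.empty
      n.insert fv (inner.insert lab (inner.getD lab 0 + 1)))
    (PySem.Dict.empty : PySem.Dict String (PySem.Dict String Int))
  let res := nested.items.map (fun p => (p.1, labels.map (fun lab => p.2.getD lab 0)))
  (res, d)

-- ===== PRECONDITION & SPEC =====
-- Pre_ excludes exactly the inputs on which the Python A raises IndexError:
-- an empty row (row[-1]) or a featureIndex out of range for some row.
def Pre_getFeatureSplit (data : List (List String)) (featureIndex : Int) : Prop :=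
  ∀ row ∈ data, row ≠ [] ∧ PySem.Raise.InRange row.length featureIndex
instance (data : List (List String)) (featureIndex : Int) : Decidable (Pre_getFeatureSplit data featureIndex) := by unfold Pre_getFeatureSplit; infer_instance

def pvWitness_getFeatureSplit : List (List String) × Int :=
  ([["a", "x"], ["b", "x"], ["a", "y"]], 0)

def Spec_getFeatureSplit (data : List (List String)) (featureIndex : Int) (out : (List (String × List Int)) × (List (String × Int))) : Prop := out = getFeatureSplit_alt data featureIndex
instance (data : List (List String)) (featureIndex : Int) (out : (List (String × List Int)) × (List (String × Int))) : Decidable (Spec_getFeatureSplit data featureIndex out) := by unfold Spec_getFeatureSplit; infer_instance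

-- ===== CLAIM (what is proved, stated in full; the proofs are below) =====
def Claim_equal_getFeatureSplit : Prop := ∀ (data : List (List String)) (featureIndex : Int), Dom_getFeatureSplit data featureIndex → Pre_getFeatureSplit data featureIndex → Spec_getFeatureSplit data featureIndex (getFeatureSplit data featureIndex)

-- ===== LEMMAS AND PROOFS =====

-- the label of a row, as both ports compute it
def pvLab (row : List String) : String := (PySem.List.pyGet? row (-1)).getD ""

-- B's materialization of one nested item into a count vector
def pvF (labels : List String) (p : String × PySem.Dict String Int) : String × List Int :=
  (p.1, labels.map (fun lab => p.2.getD lab 0))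

-- B's first-appearance label list equals the key list of A's counter
lemma labels_eq_keys (data : List (List String)) :
    data.foldl (fun ls row =>
      if ls.contains ((PySem.List.pyGet? row (-1)).getD "") then ls
      else ls ++ [(PySem.List.pyGet? row (-1)).getD ""]) ([] : List String)
    = (getLabelCounts data).keys := by
  rw [getLabelCounts, PySem.Dict.keys_foldl_modify_key, PySem.Set.update, List.foldl_map]
  simp [PySem.Set.add, PySem.Dict.empty]

lemma nodup_keys_counts (data : List (List String)) : (getLabelCounts data).keys.Nodup := by
  rw [getLabelCounts]
  exact PySem.Dict.nodup_keys_foldl_modify_key _ _ _ _ _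
    (by simp [PySem.Dict.empty, PySem.Dict.keys])

lemma lab_mem_keys (data : List (List String)) (row : List String) (h : row ∈ data) :
    pvLab row ∈ (getLabelCounts data).keys := by
  rw [getLabelCounts, PySem.Dict.keys_foldl_modify_key]
  exact (PySem.Set.mem_update _ _ _).mpr (Or.inr (List.mem_map_of_mem h))

-- A's index dict d is literally the enumerated label list, flipped
lemma dA_items (labels : List String) (hnd : labels.Nodup) :
    ((PySem.List.enumerate labels 0).foldl (fun d p => d.insert p.2 p.1)
        (PySem.Dict.empty : PySem.Dict String Int)).items
    = (PySem.List.enumerate labels 0).map (fun p => (p.2, p.1)) := by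
  rw [PySem.Dict.items_foldl_insert_fresh (PySem.List.enumerate labels 0)
      (fun p => p.2) (fun p => p.1) PySem.Dict.empty
      (by intro a _; simp [PySem.Dict.empty, PySem.Dict.contains])
      (by rw [PySem.List.map_snd_enumerate]; exact hnd)]
  simp [PySem.Dict.empty]

lemma getD_enum (labels : List String) (lab : String) (s : Int) (h : lab ∈ labels) :
    (PySem.Dict.mk ((PySem.List.enumerate labels s).map (fun p => (p.2, p.1)))).getD lab 0
    = s + ((labels.idxOf lab : Nat) : Int) := by
  induction labels generalizing s with
  | nil => cases h
  | cons x xs ih =>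
    rw [PySem.List.enumerate_cons, List.map_cons]
    by_cases hx : x = lab
    · subst hx
      simp [PySem.Dict.getD, PySem.Dict.get?_mk_cons, List.idxOf_cons_self]
    · have hm : lab ∈ xs := by
        rcases List.mem_cons.mp h with h' | h'
        · exact absurd h'.symm hx
        · exact h'
      have htail := ih (s + 1) hm
      have hbe : (x == lab) = false := by simp [hx]
      rw [PySem.Dict.getD, PySem.Dict.get?_mk_cons, hbe, List.idxOf_cons_ne _ hx]
      rw [PySem.Dict.getD] at htail
      simp only [Bool.false_eq_true, if_false]
      rw [show (Option.getD ((PySem.Dict.mk (List.map (fun p => (p.2, p.1))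
            (PySem.List.enumerate xs (s+1)))).get? lab) 0)
          = s + 1 + ((xs.idxOf lab : Nat) : Int) from htail]
      push_cast [Nat.succ_eq_add_one]
      omega

lemma set_map_idxOf (labels : List String) (g : String → Int) (lab : String) (v : Int)
    (hm : lab ∈ labels) (hnd : labels.Nodup) :
    (labels.map g).set (labels.idxOf lab) v
    = labels.map (fun x => if x = lab then v else g x) := by
  induction labels with
  | nil => cases hm
  | cons x xs ih =>
    by_cases hx : x = lab
    · subst hx
      simp only [List.map_cons, List.idxOf_cons_self, List.set_cons_zero]
      congr 1
      refine (List.map_congr_left fun y hy => ?_).symm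
      have : y ≠ x := fun he => (List.nodup_cons.mp hnd).1 (he ▸ hy)
      simp [this]
    · have hm' : lab ∈ xs := by
        rcases List.mem_cons.mp hm with h' | h'
        · exact absurd h'.symm hx
        · exact h'
      rw [List.map_cons, List.idxOf_cons_ne _ hx]
      simp only [List.set_cons_succ, List.map_cons, if_neg hx]
      rw [ih hm' (List.nodup_cons.mp hnd).2]

lemma pyGetD_map_idxOf (labels : List String) (g : String → Int) (lab : String)
    (hm : lab ∈ labels) :
    PySem.List.pyGetD (labels.map g) ((labels.idxOf lab : Nat) : Int) 0 = g lab := by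
  rw [PySem.List.pyGetD_natCast]
  have hlt := List.idxOf_lt_length_of_mem hm
  rw [List.getD_eq_getElem _ _ (by simpa using hlt)]
  simp [List.getElem_idxOf hlt]

lemma pred_comp_pvF (labels : List String) (k : String) :
    ((fun (p : String × List Int) => p.1 == k) ∘ pvF labels)
    = (fun (p : String × PySem.Dict String Int) => p.1 == k) := by
  funext p; simp [pvF]

lemma contains_mapF (labels : List String) (n : PySem.Dict String (PySem.Dict String Int)) (k : String) :
    (PySem.Dict.mk (n.items.map (pvF labels))).contains k = n.contains k := by
  simp only [PySem.Dict.contains, List.any_map, pred_comp_pvF]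

lemma get?_mapF (labels : List String) (n : PySem.Dict String (PySem.Dict String Int)) (k : String) :
    (PySem.Dict.mk (n.items.map (pvF labels))).get? k
    = (n.get? k).map (fun inner => labels.map (fun lab => inner.getD lab 0)) := by
  simp only [PySem.Dict.get?, List.find?_map, pred_comp_pvF, Option.map_map]
  congr 1

-- one step of A's res-loop matches one step of B's nested-loop under the materialization pvF
lemma step_eq (labels : List String) (dA : PySem.Dict String Int) (fv lab : String)
    (hnd : labels.Nodup) (hm : lab ∈ labels)
    (hd : dA.getD lab 0 = ((labels.idxOf lab : Nat) : Int))
    (n : PySem.Dict String (PySem.Dict String Int)) :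
    (if (PySem.Dict.mk (n.items.map (pvF labels))).contains fv then
      (PySem.Dict.mk (n.items.map (pvF labels))).insert fv
        (PySem.List.pySetD ((PySem.Dict.mk (n.items.map (pvF labels))).getD fv []) (dA.getD lab 0)
          (PySem.List.pyGetD ((PySem.Dict.mk (n.items.map (pvF labels))).getD fv []) (dA.getD lab 0) 0 + 1))
    else
      (PySem.Dict.mk (n.items.map (pvF labels))).insert fv
        (PySem.List.pySetD (labels.map (fun _ => (0 : Int))) (dA.getD lab 0) 1))
    = PySem.Dict.mk ((n.insert fv ((n.getD fv PySem.Dict.empty).insert lab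
        ((n.getD fv PySem.Dict.empty).getD lab 0 + 1))).items.map (pvF labels)) := by
  rw [hd, contains_mapF]
  by_cases hb : n.contains fv = true
  · rw [if_pos hb]
    rcases ho : n.get? fv with _ | w
    · exact absurd ((PySem.Dict.get?_eq_none_iff_contains n fv).mp ho) (by simp [hb])
    have hgd : n.getD fv PySem.Dict.empty = w := by rw [PySem.Dict.getD, ho]; rfl
    have hgd2 : (PySem.Dict.mk (n.items.map (pvF labels))).getD fv []
        = labels.map (fun x => w.getD x 0) := by
      rw [PySem.Dict.getD, get?_mapF, ho]; rfl
    rw [hgd, hgd2, pyGetD_map_idxOf labels _ lab hm, PySem.List.pySetD_natCast,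
        set_map_idxOf labels _ lab _ hm hnd]
    apply PySem.Dict.ext
    rw [PySem.Dict.items_insert_of_contains _ _ (by rw [contains_mapF]; exact hb),
        PySem.Dict.items_insert_of_contains _ _ hb]
    simp only [List.map_map]
    refine List.map_congr_left fun p hp => ?_
    by_cases hk : p.1 = fv
    · simp only [Function.comp_apply, pvF, hk, beq_self_eq_true, if_true]
      exact congrArg (fun l => (fv, l))
        (List.map_congr_left fun x _ => by rw [PySem.Dict.getD_insert]).symm
    · simp [Function.comp, pvF, hk]
  · rw [if_neg hb]
    have hgd : n.getD fv PySem.Dict.empty = PySem.Dict.empty := by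
      rw [PySem.Dict.getD]
      rcases ho : n.get? fv with _ | w
      · rfl
      · have := (PySem.Dict.get?_eq_none_iff_contains n fv).mpr (by simpa using hb)
        rw [this] at ho; cases ho
    rw [hgd, PySem.List.pySetD_natCast, set_map_idxOf labels _ lab _ hm hnd]
    apply PySem.Dict.ext
    rw [PySem.Dict.items_insert_of_not_contains _ _ (by rw [contains_mapF]; simpa using hb),
        PySem.Dict.items_insert_of_not_contains _ _ (by simpa using hb)]
    rw [List.map_append]
    congr 1
    simp only [List.map_cons, List.map_nil, pvF]
    congr 2
    refine List.map_congr_left fun x hx => ?_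
    rw [PySem.Dict.getD_insert]
    simp [PySem.Dict.empty, PySem.Dict.getD, PySem.Dict.get?]

lemma res_fold_inv (fi : Int) (labels : List String) (dA : PySem.Dict String Int)
    (hnd : labels.Nodup)
    (hd : ∀ lab ∈ labels, dA.getD lab 0 = ((labels.idxOf lab : Nat) : Int)) :
    ∀ (l : List (List String)) (n : PySem.Dict String (PySem.Dict String Int)),
      (∀ row ∈ l, pvLab row ∈ labels) →
      l.foldl (fun res inst =>
          if res.contains ((PySem.List.pyGet? inst fi).getD "") then
            res.insert ((PySem.List.pyGet? inst fi).getD "")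
              (PySem.List.pySetD (res.getD ((PySem.List.pyGet? inst fi).getD "") [])
                (dA.getD ((PySem.List.pyGet? inst (-1)).getD "") 0)
                (PySem.List.pyGetD (res.getD ((PySem.List.pyGet? inst fi).getD "") [])
                  (dA.getD ((PySem.List.pyGet? inst (-1)).getD "") 0) 0 + 1))
          else
            res.insert ((PySem.List.pyGet? inst fi).getD "")
              (PySem.List.pySetD (labels.map (fun _ => (0 : Int)))
                (dA.getD ((PySem.List.pyGet? inst (-1)).getD "") 0) 1))
        (PySem.Dict.mk (n.items.map (pvF labels)))
      = PySem.Dict.mk ((l.foldl (fun n row =>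
          n.insert ((PySem.List.pyGet? row fi).getD "")
            ((n.getD ((PySem.List.pyGet? row fi).getD "") PySem.Dict.empty).insert
              ((PySem.List.pyGet? row (-1)).getD "")
              ((n.getD ((PySem.List.pyGet? row fi).getD "") PySem.Dict.empty).getD
                ((PySem.List.pyGet? row (-1)).getD "") 0 + 1))) n).items.map (pvF labels)) := by
  intro l
  induction l with
  | nil => intro n _; rfl
  | cons row rest ih =>
    intro n hmem
    simp only [List.foldl_cons]
    rw [step_eq labels dA ((PySem.List.pyGet? row fi).getD "") ((PySem.List.pyGet? row (-1)).getD "")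
        hnd (hmem row (List.mem_cons_self)) (hd _ (hmem row (List.mem_cons_self)))]
    exact ih _ (fun r hr => hmem r (List.mem_cons_of_mem _ hr))

-- ===== VERDICT (by name: the statement is the Claim_ definition above) =====
theorem getFeatureSplit_spec : Claim_equal_getFeatureSplit := by
  intro data fi _ _
  unfold Spec_getFeatureSplit
  simp only [getFeatureSplit, getFeatureSplit_alt]
  rw [labels_eq_keys data]
  have hnd := nodup_keys_counts data
  have hitems := dA_items (getLabelCounts data).keys hnd
  have hdEq : ((PySem.List.enumerate (getLabelCounts data).keys 0).foldl
      (fun d p => d.insert p.2 p.1) (PySem.Dict.empty : PySem.Dict String Int))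
      = PySem.Dict.mk ((PySem.List.enumerate (getLabelCounts data).keys 0).map
          (fun p => (p.2, p.1))) := PySem.Dict.ext hitems
  have hd : ∀ lab ∈ (getLabelCounts data).keys,
      ((PySem.List.enumerate (getLabelCounts data).keys 0).foldl
        (fun d p => d.insert p.2 p.1) (PySem.Dict.empty : PySem.Dict String Int)).getD lab 0
      = (((getLabelCounts data).keys.idxOf lab : Nat) : Int) := by
    intro lab hm
    rw [hdEq, getD_enum _ _ _ hm]
    omega
  have hres := res_fold_inv fi (getLabelCounts data).keys
      ((PySem.List.enumerate (getLabelCounts data).keys 0).foldl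
        (fun d p => d.insert p.2 p.1) (PySem.Dict.empty : PySem.Dict String Int))
      hnd hd data PySem.Dict.empty (fun row hr => lab_mem_keys data row hr)
  refine Prod.ext ?_ hitems
  rw [show (PySem.Dict.empty : PySem.Dict String (List Int))
      = PySem.Dict.mk ((PySem.Dict.empty : PySem.Dict String (PySem.Dict String Int)).items.map
          (pvF (getLabelCounts data).keys)) from rfl, hres]
  simp [pvF]
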